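-- pv_equiv track=rewrite | github.com/dan-sf/advent_of_code | 2018/day5/solution2.py | loop_it
-- ===== SOURCE A (Python) =====
-- def loop_it(polymer):
--     output = ''
--     removal_index = set()
--     for i in range(len(polymer) - 1):
--         if polymer[i] == polymer[i+1]:
--             continue
--         if i not in removal_index and polymer[i].lower() == polymer[i+1].lower():
--             removal_index.add(i)
--             removal_index.add(i+1)
--     if removal_index:
--         for i, p in enumerate(polymer):
--             if i not in removal_index:
--                 output += p
--         return output, False
--     else:
--         return polymer, True
-- ===== SOURCE B (Python) =====
-- def loop_it(polymer):
--     out = []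
--     reacted = False
--     i = 0
--     n = len(polymer)
--     while i < n:
--         if i + 1 < n and polymer[i] != polymer[i + 1] and polymer[i].lower() == polymer[i + 1].lower():
--             reacted = True
--             i += 2
--         else:
--             out.append(polymer[i])
--             i += 1
--     return (''.join(out), False) if reacted else (polymer, True)
-- ===== Notes on version B (the rewrite author's own statement) =====
-- stated objective: simpler
-- what changed: Replaced the two-pass design (build a removal-index set over all adjacent pairs, then rebuild the string by filtering enumerate against that set) with a single forward scan that, at each position, either consumes a reacting pair (skip two) or emits the character (advance one), tracking a reacted flag.
import Mathlib
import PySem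

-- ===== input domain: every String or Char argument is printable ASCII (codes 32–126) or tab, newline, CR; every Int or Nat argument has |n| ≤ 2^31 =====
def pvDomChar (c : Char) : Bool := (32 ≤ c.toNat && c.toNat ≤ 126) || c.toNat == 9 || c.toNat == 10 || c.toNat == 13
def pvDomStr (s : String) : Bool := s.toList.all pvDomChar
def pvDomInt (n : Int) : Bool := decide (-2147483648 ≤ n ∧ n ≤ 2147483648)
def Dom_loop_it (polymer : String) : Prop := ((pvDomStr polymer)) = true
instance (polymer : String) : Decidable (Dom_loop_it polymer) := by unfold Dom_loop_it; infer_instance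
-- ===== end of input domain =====

-- B replaces A's two passes (build a removal-index set, then rebuild the string by
-- filtering against it) with a single greedy scan that either consumes a reacting
-- adjacent pair or emits the current character; same asymptotic cost, simpler.

-- ===== PORT A =====
def loop_it (polymer : String) : String × Bool :=
  let cs := polymer.toList
  let removal : PySem.Set Int :=
    (PySem.List.pyRange 0 ((cs.length : Int) - 1)).foldl
      (fun ri i =>
        if PySem.List.pyGet? cs i = PySem.List.pyGet? cs (i + 1) then ri
        else if PySem.Set.contains ri i = false ∧
            (PySem.List.pyGet? cs i).map PySem.Chars.lowerChar
              = (PySem.List.pyGet? cs (i + 1)).map PySem.Chars.lowerChar then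
          PySem.Set.add (PySem.Set.add ri i) (i + 1)
        else ri)
      PySem.Set.empty
  if removal ≠ [] then
    let output : List Char :=
      (PySem.List.enumerate cs).foldl
        (fun acc p => if removal.contains p.1 = true then acc else acc ++ [p.2]) []
    (String.ofList output, false)
  else (polymer, true)

-- ===== PORT B =====
def altGo : List Char → List Char × Bool
  | [] => ([], false)
  | [c] => ([c], false)
  | a :: b :: rest =>
    if a ≠ b ∧ PySem.Chars.lowerChar a = PySem.Chars.lowerChar b then
      ((altGo rest).1, true)
    else
      let r := altGo (b :: rest)
      (a :: r.1, r.2)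

def loop_it_alt (polymer : String) : String × Bool :=
  let r := altGo polymer.toList
  if r.2 then (String.ofList r.1, false) else (polymer, true)

-- ===== PRECONDITION & SPEC =====
def Spec_loop_it (polymer : String) (out : String × Bool) : Prop := out = loop_it_alt polymer
instance (polymer : String) (out : String × Bool) : Decidable (Spec_loop_it polymer out) := by unfold Spec_loop_it; infer_instance

-- ===== CLAIM (what is proved, stated in full; the proofs are below) =====
def Claim_equal_loop_it : Prop := ∀ (polymer : String), Dom_loop_it polymer → Spec_loop_it polymer (loop_it polymer)

-- ===== LEMMAS AND PROOFS =====

-- the indices A's first loop removes, starting at offset k (the greedy pairing)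
def rem : Int → List Char → List Int
  | _, [] => []
  | _, [_] => []
  | k, a :: b :: t =>
    if a ≠ b ∧ PySem.Chars.lowerChar a = PySem.Chars.lowerChar b then
      k :: (k + 1) :: rem (k + 2) t
    else rem (k + 1) (b :: t)

theorem rem_lb : ∀ (k : Int) (t : List Char) (j : Int), j ∈ rem k t → k ≤ j := by
  intro k t
  induction k, t using rem.induct with
  | case1 => simp [rem]
  | case2 => simp [rem]
  | case3 k a b t h ih =>
    intro j hj
    simp only [rem, if_pos h, List.mem_cons] at hj
    rcases hj with rfl | rfl | hj
    · omega
    · omega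
    · have := ih j hj; omega
  | case4 k a b t h ih =>
    intro j hj
    simp only [rem, if_neg h] at hj
    have := ih j hj; omega
theorem flagA : ∀ (k : Int) (t : List Char), (altGo t).2 = true ↔ rem k t ≠ [] := by
  intro k t
  induction k, t using rem.induct with
  | case1 => simp [rem, altGo]
  | case2 => simp [rem, altGo]
  | case3 k a b t h ih => simp [rem, altGo, if_pos h]
  | case4 k a b t h ih => simpa [rem, altGo, if_neg h] using ih

theorem enum_cons (a : Char) (t : List Char) (k : Int) :
    PySem.List.enumerate (a :: t) k = (k, a) :: PySem.List.enumerate t (k + 1) := by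
  simp [PySem.List.enumerate]

theorem filtA : ∀ (t : List Char) (k : Int) (R : List Int),
    (∀ j : Int, k ≤ j → (R.contains j = (rem k t).contains j)) →
    ((PySem.List.enumerate t k).filter (fun p => !(R.contains p.1))).map Prod.snd
      = (altGo t).1 := by
  intro t k
  induction k, t using rem.induct with
  | case1 => simp [PySem.List.enumerate, altGo]
  | case2 k c =>
    intro R hR
    have h0 : R.contains k = false := by
      rw [hR k le_rfl]; simp [rem]
    rw [enum_cons]
    simp only [List.filter_cons, h0, Bool.not_false, if_true]
    simp [PySem.List.enumerate, altGo]
  | case3 k a b t h ih =>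
    intro R hR
    have ha : R.contains k = true := by
      rw [hR k le_rfl]; simp [rem, if_pos h]
    have hb : R.contains (k + 1) = true := by
      rw [hR (k + 1) (by omega)]; simp [rem, if_pos h]
    have hrest : ∀ j : Int, k + 2 ≤ j → (R.contains j = (rem (k + 2) t).contains j) := by
      intro j hj
      rw [hR j (by omega)]
      simp only [rem, if_pos h, List.contains_cons]
      have h1 : (j == k) = false := by simp; omega
      have h2 : (j == k + 1) = false := by simp; omega
      simp [h1, h2]
    have e : k + 1 + 1 = k + 2 := by ring
    rw [enum_cons, enum_cons, e]
    simp only [List.filter_cons, ha, hb, Bool.not_true, Bool.false_eq_true, if_false]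
    simp only [altGo, if_pos h]
    exact ih R hrest
  | case4 k a b t h ih =>
    intro R hR
    have ha : R.contains k = false := by
      rw [hR k le_rfl]
      simp only [rem, if_neg h]
      by_contra hc
      have hm : (k : Int) ∈ rem (k + 1) (b :: t) := by
        simp only [Bool.not_eq_false, List.contains_iff_mem] at hc
        exact hc
      have := rem_lb _ _ _ hm; omega
    have hrest : ∀ j : Int, k + 1 ≤ j → (R.contains j = (rem (k + 1) (b :: t)).contains j) := by
      intro j hj
      rw [hR j (by omega)]; simp [rem, if_neg h]
    rw [enum_cons]
    simp only [List.filter_cons, ha, Bool.not_false, if_true, List.map_cons]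
    simp only [altGo, if_neg h]
    rw [ih R hrest]
theorem contains_false_of_lt (T : List Int) (m : Int) (h : ∀ x ∈ T, x < m) : T.contains m = false := by
  simp only [List.contains_eq_mem, decide_eq_false_iff_not]
  intro hm
  exact absurd (h m hm) (by omega)

theorem loopA (cs : List Char) : ∀ (t : List Char) (k : Nat) (S : List Int),
    cs.drop k = t → (∀ x ∈ S, x ≤ (k : Int)) →
    (PySem.List.pyRange (k : Int) ((cs.length : Int) - 1)).foldl
      (fun ri i =>
        if PySem.List.pyGet? cs i = PySem.List.pyGet? cs (i + 1) then ri
        else if PySem.Set.contains ri i = false ∧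
            (PySem.List.pyGet? cs i).map PySem.Chars.lowerChar
              = (PySem.List.pyGet? cs (i + 1)).map PySem.Chars.lowerChar then
          PySem.Set.add (PySem.Set.add ri i) (i + 1)
        else ri) S
    = S ++ (if S.contains (k : Int) then rem ((k : Int) + 1) t.tail else rem (k : Int) t) := by
  intro t
  induction t with
  | nil =>
    intro k S hdrop hS
    have hk : cs.length ≤ k := by
      have := congrArg List.length hdrop
      simp at this; omega
    rw [PySem.List.pyRange_one_eq_nil (by omega)]
    simp [rem]
  | cons a t'' ih =>
    intro k S hdrop hS
    have hklt : k < cs.length := by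
      have := congrArg List.length hdrop
      simp at this; omega
    have hget : PySem.List.pyGet? cs (k : Int) = some a := by
      rw [PySem.List.pyGet?_natCast]
      have h0 : (cs.drop k)[0]? = some a := by rw [hdrop]; rfl
      rw [List.getElem?_drop] at h0; simpa using h0
    have hdrop' : cs.drop (k + 1) = t'' := by
      have h1 : cs.drop (k + 1) = (cs.drop k).tail := by
        rw [List.tail_drop]
      rw [h1, hdrop]; rfl
    cases t'' with
    | nil =>
      have hk1 : cs.length = k + 1 := by
        have := congrArg List.length hdrop
        simp at this; omega
      rw [PySem.List.pyRange_one_eq_nil (by omega)]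
      simp [rem]
    | cons b t' =>
      have hget1 : PySem.List.pyGet? cs ((k : Int) + 1) = some b := by
        have e : ((k : Int) + 1) = ((k + 1 : Nat) : Int) := by push_cast; ring
        rw [e, PySem.List.pyGet?_natCast]
        have h0 : (cs.drop (k+1))[0]? = some b := by rw [hdrop']; rfl
        rw [List.getElem?_drop] at h0; simpa using h0
      have hlen : k + 1 < cs.length := by
        have := congrArg List.length hdrop
        simp at this; omega
      rw [PySem.List.pyRange_one_cons (by omega), List.foldl_cons]
      have ecast : ((k : Int) + 1) = ((k + 1 : Nat) : Int) := by push_cast; ring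
      by_cases hsk : S.contains (k : Int) = true
      · -- index k already removed: this iteration is a no-op
        have hmem : (k : Int) ∈ S := by
          simpa only [List.contains_eq_mem, decide_eq_true_eq] using hsk
        have hstep : (if PySem.List.pyGet? cs (k : Int) = PySem.List.pyGet? cs ((k : Int) + 1) then S
            else if PySem.Set.contains S (k : Int) = false ∧
                (PySem.List.pyGet? cs (k : Int)).map PySem.Chars.lowerChar
                  = (PySem.List.pyGet? cs ((k : Int) + 1)).map PySem.Chars.lowerChar then
              PySem.Set.add (PySem.Set.add S (k : Int)) ((k : Int) + 1)
            else S) = S := by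
          split_ifs with h1 h2
          · rfl
          · exact absurd h2.1 (by
              simp only [PySem.Set.contains, List.contains_eq_mem, decide_eq_false_iff_not]
              exact fun hf => hf hmem)
          · rfl
        rw [hstep, ecast]
        rw [ih (k + 1) S hdrop' (fun x hx => by have := hS x hx; push_cast; omega)]
        have hc1 : S.contains ((k + 1 : Nat) : Int) = false :=
          contains_false_of_lt S _ (fun x hx => by have := hS x hx; push_cast; omega)
        simp only [hc1, hsk, Bool.false_eq_true, if_false, if_true, List.tail_cons]
      · have hskf : S.contains (k : Int) = false := by
          cases h : S.contains (k : Int) with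
          | true => exact absurd h hsk
          | false => rfl
        have hns : (k : Int) ∉ S := by
          simpa only [List.contains_eq_mem, decide_eq_false_iff_not] using hskf
        by_cases hab : a = b
        · have hstep : (if PySem.List.pyGet? cs (k : Int) = PySem.List.pyGet? cs ((k : Int) + 1) then S
              else if PySem.Set.contains S (k : Int) = false ∧
                  (PySem.List.pyGet? cs (k : Int)).map PySem.Chars.lowerChar
                    = (PySem.List.pyGet? cs ((k : Int) + 1)).map PySem.Chars.lowerChar then
                PySem.Set.add (PySem.Set.add S (k : Int)) ((k : Int) + 1)
              else S) = S := by
            simp [hget, hget1, hab]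
          rw [hstep, ecast]
          rw [ih (k + 1) S hdrop' (fun x hx => by have := hS x hx; push_cast; omega)]
          have hc1 : S.contains ((k + 1 : Nat) : Int) = false :=
            contains_false_of_lt S _ (fun x hx => by have := hS x hx; push_cast; omega)
          simp only [hc1, hskf, Bool.false_eq_true, if_false, List.tail_cons]
          rw [show rem ((k : Int)) (a :: b :: t') = rem ((k : Int) + 1) (b :: t') from by
            simp [rem, hab], ecast]
        · by_cases hlow : PySem.Chars.lowerChar a = PySem.Chars.lowerChar b
          · -- reaction: indices k and k+1 are added
            have hstep : (if PySem.List.pyGet? cs (k : Int) = PySem.List.pyGet? cs ((k : Int) + 1) then S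
                else if PySem.Set.contains S (k : Int) = false ∧
                    (PySem.List.pyGet? cs (k : Int)).map PySem.Chars.lowerChar
                      = (PySem.List.pyGet? cs ((k : Int) + 1)).map PySem.Chars.lowerChar then
                  PySem.Set.add (PySem.Set.add S (k : Int)) ((k : Int) + 1)
                else S) = S ++ [(k : Int), (k : Int) + 1] := by
              have hc0 : PySem.Set.contains S (k : Int) = false := by
                simp only [PySem.Set.contains, List.contains_eq_mem, decide_eq_false_iff_not]
                exact hns
              have hl0 : (PySem.List.pyGet? cs (k : Int)).map PySem.Chars.lowerChar
                  = (PySem.List.pyGet? cs ((k : Int) + 1)).map PySem.Chars.lowerChar := by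
                simp [hget, hget1, hlow]
              rw [if_neg (by simp [hget, hget1, hab]), if_pos ⟨hc0, hl0⟩]
              have e1 : PySem.Set.add S (k : Int) = S ++ [(k : Int)] := by
                simp [PySem.Set.add, hns]
              rw [e1]
              have hns1 : ((k : Int) + 1) ∉ S ++ [(k : Int)] := by
                intro hx
                rcases List.mem_append.mp hx with h1 | h1
                · have := hS _ h1; omega
                · simp at h1
              simp [PySem.Set.add, hns1]
            rw [hstep, ecast]
            rw [ih (k + 1) (S ++ [(k : Int), ((k + 1 : Nat) : Int)]) hdrop'
              (fun x hx => by
                rcases List.mem_append.mp hx with h1 | h1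
                · have := hS x h1; push_cast; omega
                · simp at h1; push_cast; omega)]
            have hc1 : (S ++ [(k : Int), ((k + 1 : Nat) : Int)]).contains ((k + 1 : Nat) : Int) = true := by
              simp only [List.contains_eq_mem, decide_eq_true_eq, List.mem_append]
              right; simp
            simp only [hc1, if_true, List.tail_cons]
            rw [show rem ((k : Int)) (a :: b :: t')
                = (k : Int) :: ((k : Int) + 1) :: rem ((k : Int) + 2) t' from by
              simp [rem, hab, hlow]]
            rw [show (((k + 1 : Nat) : Int) + 1) = (k : Int) + 2 from by push_cast; ring]
            simp only [hskf, Bool.false_eq_true, if_false]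
            simp
          · have hstep : (if PySem.List.pyGet? cs (k : Int) = PySem.List.pyGet? cs ((k : Int) + 1) then S
                else if PySem.Set.contains S (k : Int) = false ∧
                    (PySem.List.pyGet? cs (k : Int)).map PySem.Chars.lowerChar
                      = (PySem.List.pyGet? cs ((k : Int) + 1)).map PySem.Chars.lowerChar then
                  PySem.Set.add (PySem.Set.add S (k : Int)) ((k : Int) + 1)
                else S) = S := by
              rw [if_neg (by simp [hget, hget1, hab]), if_neg (by simp [hget, hget1, hlow])]
            rw [hstep, ecast]
            rw [ih (k + 1) S hdrop' (fun x hx => by have := hS x hx; push_cast; omega)]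
            have hc1 : S.contains ((k + 1 : Nat) : Int) = false :=
              contains_false_of_lt S _ (fun x hx => by have := hS x hx; push_cast; omega)
            simp only [hc1, hskf, Bool.false_eq_true, if_false, List.tail_cons]
            rw [show rem ((k : Int)) (a :: b :: t') = rem ((k : Int) + 1) (b :: t') from by
              simp [rem, hlow], ecast]
theorem loop_it_eq_alt (polymer : String) : loop_it polymer = loop_it_alt polymer := by
  simp only [loop_it, loop_it_alt]
  have hloop := loopA polymer.toList polymer.toList 0 [] (by simp) (by simp)
  simp only [Nat.cast_zero, List.contains_nil, Bool.false_eq_true, if_false,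
    List.nil_append] at hloop
  have hempty : (PySem.Set.empty : PySem.Set Int) = [] := rfl
  rw [hempty] at *
  rw [hloop]
  by_cases hr : rem 0 polymer.toList = []
  · have hflag : (altGo polymer.toList).2 = false := by
      cases h : (altGo polymer.toList).2 with
      | false => rfl
      | true => exact absurd ((flagA 0 polymer.toList).mp h) (by simp [hr])
    simp [hr, hflag]
  · have hflag : (altGo polymer.toList).2 = true := (flagA 0 polymer.toList).mpr hr
    have hfun : (fun (acc : List Char) (p : Int × Char) =>
          if PySem.Set.contains (rem 0 polymer.toList) p.1 = true then acc else acc ++ [p.2])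
        = (fun (acc : List Char) (p : Int × Char) =>
          if (!(rem 0 polymer.toList).contains p.1) = true then acc ++ [p.2] else acc) := by
      funext acc p
      cases h : PySem.Set.contains (rem 0 polymer.toList) p.1 <;>
        simp [PySem.Set.contains] at h <;> simp [h]
    rw [hfun, PySem.List.foldl_append_if]
    rw [filtA polymer.toList 0 (rem 0 polymer.toList) (fun j _ => rfl)]
    simp [hr, hflag]

-- ===== VERDICT (by name: the statement is the Claim_ definition above) =====
theorem loop_it_spec : Claim_equal_loop_it := by
  intro polymer _
  unfold Spec_loop_it
  exact loop_it_eq_alt polymer
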